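-- pv_equiv track=rewrite | github.com/mateus2k2/metaheuristic | src/methods/construtivas.py | LPD
-- ===== SOURCE A (Python) =====
-- def LPD(jobs):
--     """
--     Sorting the jobs always inserting the largest and the smallest jobs in alternation
--     """
--     n = len(jobs)
--     result = [None] * n
--     left, right = 0, n - 1
--     toggle = True
--
--     for i in range(n):
--         if toggle:
--             result[right] = jobs[i]
--             right -= 1
--         else:
--             result[left] = jobs[i]
--             left += 1
--         toggle = not toggle
--
--     return [job for job in result if job is not None]
-- ===== SOURCE B (Python) =====
-- def LPD(jobs):
--     left, right = [], []
--     for i, job in enumerate(jobs):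
--         if i % 2:
--             left.append(job)
--         else:
--             right.append(job)
--     return left + right[::-1]
-- ===== Notes on version B (the rewrite author's own statement) =====
-- stated objective: simpler
-- what changed: Replaces the preallocated result array with two moving index pointers and a toggle by a single enumerate pass that partitions elements by index parity into two lists and returns left + reversed(right), removing the pointers, the toggle and the None filter.
import Mathlib
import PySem

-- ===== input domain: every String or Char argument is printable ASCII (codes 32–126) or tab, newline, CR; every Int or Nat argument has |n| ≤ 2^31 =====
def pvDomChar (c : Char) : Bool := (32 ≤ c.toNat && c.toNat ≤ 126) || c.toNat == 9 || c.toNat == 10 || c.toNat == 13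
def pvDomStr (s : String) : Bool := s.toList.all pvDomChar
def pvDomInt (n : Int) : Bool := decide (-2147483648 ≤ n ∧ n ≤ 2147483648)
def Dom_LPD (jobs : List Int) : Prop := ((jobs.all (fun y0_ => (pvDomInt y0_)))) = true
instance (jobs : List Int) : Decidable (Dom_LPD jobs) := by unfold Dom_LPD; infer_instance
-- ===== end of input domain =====

-- B replaces A's preallocated result array with two moving index pointers and a toggle
-- by a single enumerate pass that partitions by index parity and concatenates (objective: simpler).


-- ===== PORT A =====
def LPD (jobs : List Int) : List Int :=
  let n : Int := PySem.List.len jobs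
  let result : List (Option Int) := List.replicate n.toNat none
  let st := (PySem.List.pyRange 0 n 1).foldl
    (fun (st : List (Option Int) × Int × Int × Bool) i =>
      match st with
      | (result, left, right, toggle) =>
        if toggle then
          (PySem.List.pySetD result right (some (PySem.List.pyGetD jobs i 0)), left, right - 1, false)
        else
          (PySem.List.pySetD result left (some (PySem.List.pyGetD jobs i 0)), left + 1, right, true))
    (result, 0, n - 1, true)
  st.1.filterMap (fun j => j)

-- ===== PORT B =====
def LPD_alt (jobs : List Int) : List Int :=
  let st := (PySem.List.enumerate jobs).foldl
    (fun (acc : List Int × List Int) p =>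
      if p.1 % 2 ≠ 0 then (acc.1 ++ [p.2], acc.2) else (acc.1, acc.2 ++ [p.2]))
    ([], [])
  st.1 ++ st.2.reverse

-- ===== PRECONDITION & SPEC =====
def Spec_LPD (jobs : List Int) (out : List Int) : Prop := out = LPD_alt jobs
instance (jobs : List Int) (out : List Int) : Decidable (Spec_LPD jobs out) := by unfold Spec_LPD; infer_instance

-- ===== CLAIM (what is proved, stated in full; the proofs are below) =====
def Claim_equal_LPD : Prop := ∀ (jobs : List Int), Dom_LPD jobs → Spec_LPD jobs (LPD jobs)

-- ===== LEMMAS AND PROOFS =====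

-- elements of a list at even positions / at odd positions
mutual
def pvEvens : List Int → List Int
  | [] => []
  | x :: xs => x :: pvOdds xs
def pvOdds : List Int → List Int
  | [] => []
  | _ :: xs => pvEvens xs
end

-- two-at-a-time induction pattern
def pvPairRec : List Int → Unit
  | [] => ()
  | [_] => ()
  | _ :: _ :: r => pvPairRec r

theorem pvEvens_pair (x y : Int) (r : List Int) : pvEvens (x :: y :: r) = x :: pvEvens r := rfl
theorem pvOdds_pair (x y : Int) (r : List Int) : pvOdds (x :: y :: r) = y :: pvOdds r := rfl

-- B's loop: partitions by index parity, with the parity of the start index s deciding sides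
theorem pvB_inv (xs : List Int) : ∀ (s : Int) (L R : List Int), 0 ≤ s →
    (PySem.List.enumerate xs s).foldl
      (fun (acc : List Int × List Int) p =>
        if p.1 % 2 ≠ 0 then (acc.1 ++ [p.2], acc.2) else (acc.1, acc.2 ++ [p.2]))
      (L, R)
    = (L ++ (if s % 2 = 0 then pvOdds xs else pvEvens xs),
       R ++ (if s % 2 = 0 then pvEvens xs else pvOdds xs)) := by
  induction xs with
  | nil => intro s L R _; simp [PySem.List.enumerate_nil, pvEvens, pvOdds]
  | cons x xs ih =>
    intro s L R hs
    rw [PySem.List.enumerate_cons, List.foldl_cons]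
    rcases Int.emod_two_eq s with h | h
    · simp only [h]
      have h1 : (s + 1) % 2 = 1 := by omega
      simp only [ne_eq, not_true_eq_false, if_false]
      rw [ih (s + 1) L (R ++ [x]) (by omega)]
      simp [h1, pvEvens, pvOdds]
    · have h1 : (s + 1) % 2 = 0 := by omega
      simp only [ne_eq, h, if_pos (by omega : ¬ ((1 : Int) = 0)) ]
      rw [ih (s + 1) (L ++ [x]) R (by omega)]
      simp [h1, pvEvens, pvOdds]

-- A's loop (already rephrased as a fold over the job values): fills the gap of none's
-- between the already-placed left part A and right part B
theorem pvA_inv (rest : List Int) : ∀ (A B : List Int),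
    (rest.foldl
      (fun (st : List (Option Int) × Int × Int × Bool) v =>
        match st with
        | (result, left, right, toggle) =>
          if toggle then (PySem.List.pySetD result right (some v), left, right - 1, false)
          else (PySem.List.pySetD result left (some v), left + 1, right, true))
      (List.map some A ++ List.replicate rest.length none ++ List.map some B,
       (A.length : Int), (A.length : Int) + rest.length - 1, true)).1
    = List.map some (A ++ pvOdds rest ++ (pvEvens rest).reverse ++ B) := by
  induction rest using pvPairRec.induct with
  | case1 => intro A B; simp [pvEvens, pvOdds]
  | case2 x =>
    intro A B
    simp [pvEvens, pvOdds]
  | case3 x y r ih =>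
    intro A B
    simp only [List.foldl_cons, List.length_cons]
    have e1 : ((A.length:ℤ) + ((r.length + 1 + 1 : ℕ):ℤ) - 1) = ((A.length + r.length + 1 : ℕ) : ℤ) := by
      push_cast; ring
    have h1 : PySem.List.pySetD
        (List.map some A ++ List.replicate (r.length + 1 + 1) none ++ List.map some B)
        ((A.length:ℤ) + ((r.length + 1 + 1 : ℕ):ℤ) - 1) (some x)
        = List.map some A ++ List.replicate (r.length + 1) none ++ List.map some (x :: B) := by
      rw [e1, PySem.List.pySetD_natCast, List.set_append, if_pos (by simp; omega)]
      rw [List.set_append_right _ _ (by simp; omega)]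
      rw [List.replicate_succ' (a := (none : Option Int)) (n := r.length + 1)]
      rw [List.set_append_right _ _ (by simp; omega)]
      have e0 : A.length + r.length + 1 - A.length - (r.length + 1) = 0 := by omega
      simp [e0]
    have h2 : PySem.List.pySetD
        (List.map some A ++ List.replicate (r.length + 1) none ++ List.map some (x :: B))
        ((A.length:ℤ)) (some y)
        = List.map some (A ++ [y]) ++ List.replicate r.length none ++ List.map some (x :: B) := by
      rw [PySem.List.pySetD_natCast, List.set_append, if_pos (by simp)]
      rw [List.set_append_right _ _ (by simp)]
      simp [List.replicate_succ]
    rw [h1]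
    simp only [if_true, Bool.false_eq_true, if_false]
    rw [h2]
    have e3 : ((A.length:ℤ) + ((r.length + 1 + 1 : ℕ):ℤ) - 1 - 1) = ((A ++ [y]).length : ℤ) + (r.length : ℤ) - 1 := by
      simp; ring
    have e2 : ((A.length:ℤ) + 1) = ((A ++ [y]).length : ℤ) := by simp
    rw [e3, e2]
    rw [ih (A ++ [y]) (x :: B)]
    simp [pvEvens_pair, pvOdds_pair]

theorem pv_lemma_a (jobs : List Int) : LPD jobs = pvOdds jobs ++ (pvEvens jobs).reverse := by
  unfold LPD
  dsimp only
  have hb := PySem.List.foldl_pyRange_pyGetD jobs 0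
    (fun (st : List (Option Int) × Int × Int × Bool) v =>
      match st with
      | (result, left, right, toggle) =>
        if toggle then (PySem.List.pySetD result right (some v), left, right - 1, false)
        else (PySem.List.pySetD result left (some v), left + 1, right, true))
    (List.replicate (PySem.List.len jobs).toNat (none : Option Int), (0:ℤ), PySem.List.len jobs - 1, true)
    (le_refl 0)
  dsimp only at hb
  rw [hb]
  have hinit : (List.replicate (PySem.List.len jobs).toNat (none : Option Int),
      (0 : ℤ), PySem.List.len jobs - 1, true)
      = (List.map some [] ++ List.replicate jobs.length none ++ List.map some [],
      (([] : List Int).length : ℤ), (([] : List Int).length : ℤ) + (jobs.length : ℤ) - 1, true) := by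
    simp [PySem.List.len]
  rw [Int.toNat_zero, List.drop_zero, hinit, pvA_inv jobs [] []]
  simp [List.filterMap_map]

theorem pv_lemma_b (jobs : List Int) : LPD_alt jobs = pvOdds jobs ++ (pvEvens jobs).reverse := by
  unfold LPD_alt
  rw [pvB_inv jobs 0 [] [] le_rfl]
  simp

-- ===== VERDICT (by name: the statement is the Claim_ definition above) =====
theorem LPD_spec : Claim_equal_LPD := by
  intro jobs _
  unfold Spec_LPD
  rw [pv_lemma_a, pv_lemma_b]
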